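-- pv_equiv track=rewrite | github.com/sinaziaee/tenat_back | scripts/tf_idf/tf_idf.py | words_frequency
-- ===== SOURCE A (Python) =====
-- def words_frequency(document_word):
--     words_in_docs = {}
--     for doc in document_word.keys():
--         for word in document_word[doc]:
--             if word not in words_in_docs:
--                 words_in_docs[word] = [doc]
--             elif doc not in words_in_docs[word]:
--                 words_in_docs[word].append(doc)
--     return words_in_docs
-- ===== SOURCE B (Python) =====
-- def words_frequency(document_word):
--     words = list(dict.fromkeys(w for ws in document_word.values() for w in ws))
--     return {w: [doc for doc, ws in document_word.items() if w in ws] for w in words}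
-- ===== Notes on version B (the rewrite author's own statement) =====
-- stated objective: alternative
-- what changed: Inverts the loop nesting: B first collects the distinct words in first-encounter order, then builds each word's doc list by a word-outer/doc-inner membership scan, instead of A's doc-outer pass that grows a dict with per-word de-duplication checks.
import Mathlib
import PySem

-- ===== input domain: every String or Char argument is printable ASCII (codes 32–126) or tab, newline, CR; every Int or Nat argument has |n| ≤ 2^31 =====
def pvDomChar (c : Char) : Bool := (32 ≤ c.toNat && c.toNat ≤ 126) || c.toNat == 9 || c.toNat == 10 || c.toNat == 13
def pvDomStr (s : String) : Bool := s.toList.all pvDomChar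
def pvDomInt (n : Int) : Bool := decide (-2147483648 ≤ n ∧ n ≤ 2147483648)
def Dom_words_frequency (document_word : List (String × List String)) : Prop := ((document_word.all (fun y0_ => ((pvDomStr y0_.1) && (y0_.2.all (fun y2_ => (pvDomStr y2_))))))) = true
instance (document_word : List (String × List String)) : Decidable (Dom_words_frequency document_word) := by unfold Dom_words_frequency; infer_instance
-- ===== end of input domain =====

-- B inverts the loop nesting (word-outer over the distinct words, doc-inner membership scan)
-- instead of A's doc-outer dict-growing pass; objective: alternative decomposition, same result.


-- ===== PORT A =====
-- body of A's inner loop: one word of the current doc is folded into the dict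
def stepA (doc : String) (words_in_docs : PySem.Dict String (List String)) (word : String) :
    PySem.Dict String (List String) :=
  match words_in_docs.get? word with
  | none => words_in_docs.insert word [doc]                 -- word not in words_in_docs
  | some ds =>
      if doc ∈ ds then words_in_docs                        -- already recorded
      else words_in_docs.insert word (ds ++ [doc])          -- .append(doc) (in-place overwrite)

def words_frequency (document_word : List (String × List String)) : List (String × List String) :=
  ((PySem.Dict.mk document_word).keys.foldl
    (fun words_in_docs doc =>
      ((PySem.Dict.mk document_word).getD doc []).foldl (stepA doc) words_in_docs)
    PySem.Dict.empty).items

-- ===== PORT B =====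
def words_frequency_alt (document_word : List (String × List String)) : List (String × List String) :=
  let words := PySem.Set.ofList ((document_word.map Prod.snd).flatten)   -- dict.fromkeys of all words
  words.map (fun w => (w, (document_word.filter (fun p => decide (w ∈ p.2))).map Prod.fst))

-- ===== PRECONDITION & SPEC =====
-- Pre_: the association list encodes a Python dict, whose keys are necessarily distinct;
-- duplicate-key lists correspond to no Python input of A.
def Pre_words_frequency (document_word : List (String × List String)) : Prop :=
  (document_word.map Prod.fst).Nodup
instance (document_word : List (String × List String)) : Decidable (Pre_words_frequency document_word) := by unfold Pre_words_frequency; infer_instance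

def pvWitness_words_frequency : (List (String × List String)) :=
  [("d1", ["a", "b", "a"]), ("d2", ["b", "c"])]

def Spec_words_frequency (document_word : List (String × List String)) (out : List (String × List String)) : Prop := out = words_frequency_alt document_word
instance (document_word : List (String × List String)) (out : List (String × List String)) : Decidable (Spec_words_frequency document_word out) := by unfold Spec_words_frequency; infer_instance

-- ===== CLAIM (what is proved, stated in full; the proofs are below) =====
def Claim_equal_words_frequency : Prop := ∀ (document_word : List (String × List String)), Dom_words_frequency document_word → Pre_words_frequency document_word → Spec_words_frequency document_word (words_frequency document_word)


-- ===== LEMMAS AND PROOFS =====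

-- the dict A builds, as a fold over the (doc, words) pairs (proof-side restatement of A's loop)
def Afold (l : List (String × List String)) : PySem.Dict String (List String) :=
  l.foldl (fun wid p => p.2.foldl (stepA p.1) wid) PySem.Dict.empty

-- one inner loop of A: how folding all words of one doc into the dict transforms its items
theorem inner_loop (doc : String) (ws : List String)
    (d : PySem.Dict String (List String)) (hk : d.keys.Nodup) :
    (ws.foldl (stepA doc) d).items =
      d.items.map (fun p => (p.1, p.2 ++ if p.1 ∈ ws ∧ doc ∉ p.2 then [doc] else []))
      ++ ((PySem.Set.ofList ws).filter (fun w => !(d.contains w))).map (fun w => (w, [doc])) := by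
  induction ws generalizing d with
  | nil => simp
  | cons w ws ih =>
    simp only [List.foldl_cons]
    cases h : d.get? w with
    | none =>
      have hnotmem : w ∉ d.keys := (PySem.Dict.get?_eq_none_iff_not_mem_keys d w).1 h
      have hc : d.contains w = false := by
        simp [PySem.Dict.contains_eq_decide_mem_keys, hnotmem]
      have hstep : stepA doc d w = d.insert w [doc] := by unfold stepA; rw [h]
      have hk' : (d.insert w [doc]).keys.Nodup := PySem.Dict.nodup_keys_insert _ _ _ hk
      rw [hstep, ih _ hk', PySem.Dict.items_insert_of_not_contains d _ hc, List.map_append,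
        PySem.Set.ofList_cons]
      have sub1 : d.items.map (fun p => (p.1, p.2 ++ if p.1 ∈ ws ∧ doc ∉ p.2 then [doc] else []))
          = d.items.map (fun p => (p.1, p.2 ++ if p.1 ∈ w :: ws ∧ doc ∉ p.2 then [doc] else [])) := by
        apply List.map_congr_left
        intro p hp
        have hne : p.1 ≠ w := fun e => hnotmem (e ▸ PySem.Dict.mem_keys_of_mem_items d hp)
        simp [List.mem_cons, hne]
      have sub3 : (PySem.Set.ofList ws).filter (fun x => !((d.insert w [doc]).contains x))
          = ((PySem.Set.ofList ws).discard w).filter (fun x => !(d.contains x)) := by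
        rw [PySem.Set.discard, List.filter_filter]
        apply List.filter_congr
        intro x hx
        rw [PySem.Dict.contains_insert]
        cases hxw : (x == w)
        · simp
        · simp
      rw [sub3, sub1]
      simp [hc, List.append_assoc]
    | some ds =>
      have hwds : (w, ds) ∈ d.items := (PySem.Dict.get?_eq_some_iff_mem_items d w ds hk).1 h
      have hc : d.contains w = true :=
        (PySem.Dict.contains_iff_mem_keys d w).2 (PySem.Dict.mem_keys_of_mem_items d hwds)
      have hval : ∀ p ∈ d.items, p.1 = w → p.2 = ds := by
        intro p hp hpw
        have hg : d.get? p.1 = some p.2 :=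
          PySem.Dict.get?_of_mem_items d (by simpa using hp) hk
        rw [hpw, h] at hg
        exact (Option.some_inj.mp hg).symm
      have subf : ((PySem.Set.ofList (w :: ws)).filter (fun x => !(d.contains x)))
          = (PySem.Set.ofList ws).filter (fun x => !(d.contains x)) := by
        rw [PySem.Set.ofList_cons, List.filter_cons, PySem.Set.discard, List.filter_filter]
        simp only [hc, Bool.not_true, Bool.false_eq_true, if_false]
        apply List.filter_congr
        intro x hx
        cases hxw : (x == w)
        · simp
        · have : x = w := eq_of_beq hxw
          simp [this, hc]
      by_cases hd : doc ∈ ds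
      · have hstep : stepA doc d w = d := by unfold stepA; rw [h]; simp [hd]
        rw [hstep, ih d hk, subf]
        congr 1
        apply List.map_congr_left
        intro p hp
        by_cases hpw : p.1 = w
        · have hp2 : p.2 = ds := hval p hp hpw
          simp [hp2, hd]
        · simp [List.mem_cons, hpw]
      · have hstep : stepA doc d w = d.insert w (ds ++ [doc]) := by
          unfold stepA; rw [h]; simp [hd]
        have hkeys' : (d.insert w (ds ++ [doc])).keys = d.keys :=
          PySem.Dict.keys_insert_of_contains d _ hc
        have hk' : (d.insert w (ds ++ [doc])).keys.Nodup := by rw [hkeys']; exact hk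
        have hcont' : ∀ x, (d.insert w (ds ++ [doc])).contains x = d.contains x := by
          intro x
          rw [PySem.Dict.contains_eq_decide_mem_keys, PySem.Dict.contains_eq_decide_mem_keys,
            hkeys']
        have subf2 : (PySem.Set.ofList ws).filter (fun x => !((d.insert w (ds ++ [doc])).contains x))
            = (PySem.Set.ofList ws).filter (fun x => !(d.contains x)) :=
          List.filter_congr (fun x _ => by rw [hcont' x])
        rw [hstep, ih _ hk', PySem.Dict.items_insert_of_contains d _ hc, List.map_map, subf2,
          ← subf]
        congr 1
        apply List.map_congr_left
        intro p hp
        by_cases hpw : p.1 = w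
        · have hp2 : p.2 = ds := hval p hp hpw
          simp [Function.comp, hpw, hp2, hd]
        · simp [Function.comp, List.mem_cons, hpw]

-- docs contributing to a word's list are keys of l
theorem mem_map_fst_filter {l : List (String × List String)} {q : String × List String → Bool}
    {x : String} (hx : x ∈ (l.filter q).map Prod.fst) : x ∈ l.map Prod.fst := by
  simp only [List.mem_map, List.mem_filter] at hx ⊢
  obtain ⟨p, ⟨hp, _⟩, he⟩ := hx
  exact ⟨p, hp, he⟩

-- the invariant: A's dict after processing a prefix of the pairs is exactly B's table of that prefix
theorem afold_items : ∀ (l : List (String × List String)), (l.map Prod.fst).Nodup →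
    (Afold l).items = words_frequency_alt l := by
  intro l
  induction l using List.reverseRecOn with
  | nil => intro _; simp [Afold, words_frequency_alt, PySem.Dict.empty]
  | append_singleton l p ih =>
    intro hnd
    have hndl : (l.map Prod.fst).Nodup := by
      rw [List.map_append] at hnd
      exact (List.nodup_append.mp hnd).1
    have hfresh : p.1 ∉ l.map Prod.fst := by
      rw [List.map_append, List.nodup_append] at hnd
      intro hmem
      exact hnd.2.2 p.1 hmem p.1 (by simp) rfl
    have hAf : Afold (l ++ [p]) = p.2.foldl (stepA p.1) (Afold l) := by
      simp [Afold, List.foldl_append]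
    have hitems := ih hndl
    have hkeys : (Afold l).keys = PySem.Set.ofList ((l.map Prod.snd).flatten) := by
      simp only [PySem.Dict.keys]
      rw [hitems]
      simp [words_frequency_alt, Function.comp_def]
    have hknd : (Afold l).keys.Nodup := by rw [hkeys]; exact PySem.Set.nodup_ofList _
    have hW : PySem.Set.ofList (((l ++ [p]).map Prod.snd).flatten)
        = PySem.Set.ofList ((l.map Prod.snd).flatten)
          ++ (PySem.Set.ofList p.2).filter
              (fun y => !(PySem.Set.contains (PySem.Set.ofList ((l.map Prod.snd).flatten)) y)) := by
      rw [List.map_append, List.flatten_append]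
      simp only [List.map_cons, List.map_nil, List.flatten_cons, List.flatten_nil,
        List.append_nil]
      rw [PySem.Set.ofList_append, PySem.Set.update_eq_append_filter]
    have hnil : ∀ w, w ∉ PySem.Set.ofList ((l.map Prod.snd).flatten) →
        l.filter (fun q => decide (w ∈ q.2)) = [] := by
      intro w hw
      rw [List.filter_eq_nil_iff]
      intro q hq
      simp only [decide_eq_true_eq]
      intro hwq
      exact hw ((PySem.Set.mem_ofList _ _).2 (List.mem_flatten.2 ⟨q.2, List.mem_map.2 ⟨q, hq, rfl⟩, hwq⟩))
    rw [hAf, inner_loop p.1 p.2 (Afold l) hknd, hitems]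
    simp only [words_frequency_alt]
    rw [hW, List.map_append, List.map_map]
    have hcont : ∀ x, (Afold l).contains x
        = PySem.Set.contains (PySem.Set.ofList ((l.map Prod.snd).flatten)) x := by
      intro x
      rw [PySem.Dict.contains_eq_decide_mem_keys, hkeys]
      simp
    congr 1
    · apply List.map_congr_left
      intro w hw
      have hp1 : p.1 ∉ (l.filter (fun q => decide (w ∈ q.2))).map Prod.fst :=
        fun hmem => hfresh (mem_map_fst_filter hmem)
      by_cases hwp : w ∈ p.2
      · simp [Function.comp, List.filter_append, hwp, hp1]
      · simp [Function.comp, List.filter_append, hwp, hp1]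
    · rw [List.filter_congr (fun x _ => by rw [hcont x] :
        ∀ x ∈ PySem.Set.ofList p.2, (!(Afold l).contains x)
          = (!PySem.Set.contains (PySem.Set.ofList ((l.map Prod.snd).flatten)) x))]
      apply List.map_congr_left
      intro w hw
      simp only [List.mem_filter, PySem.Set.mem_ofList, Bool.not_eq_eq_eq_not, Bool.not_true] at hw
      obtain ⟨hwp, hwc⟩ := hw
      have hwW : w ∉ PySem.Set.ofList ((l.map Prod.snd).flatten) := by
        intro hmem
        have := (PySem.Set.contains_iff _ _).2 hmem
        rw [this] at hwc
        cases hwc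
      rw [List.filter_append, hnil w hwW]
      simp [hwp]

-- A's port, rewritten as the pair-level fold (keys of a Nodup dict are the pairs' firsts)
theorem wf_eq_afold (dw : List (String × List String)) (h : (dw.map Prod.fst).Nodup) :
    words_frequency dw = (Afold dw).items := by
  unfold words_frequency Afold
  congr 1
  have hkeys : (PySem.Dict.mk dw).keys = dw.map Prod.fst := by simp [PySem.Dict.keys]
  have hnd : (PySem.Dict.mk dw).keys.Nodup := by rw [hkeys]; exact h
  rw [hkeys, List.foldl_map]
  apply PySem.List.foldl_congr_mem
  intro acc x hx
  have hget : (PySem.Dict.mk dw).getD x.1 [] = x.2 :=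
    PySem.Dict.getD_of_mem_items _ (by simpa using hx) hnd []
  rw [hget]

-- ===== VERDICT (by name: the statement is the Claim_ definition above) =====
theorem words_frequency_spec : Claim_equal_words_frequency := by
  intro dw _ hpre
  unfold Spec_words_frequency
  rw [wf_eq_afold dw hpre, afold_items dw hpre]
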